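-- pv_equiv track=rewrite | github.com/KMinwoo28/Baekjoon-Solved-Problems | Python/백준/Silver/17829. 222－풀링/222－풀링.py | two_pooling
-- ===== SOURCE A (Python) =====
-- def two_pooling(mat, N):
--     if N == 1:
--         return mat[0][0]
--     sub_mat = [[] for _ in range(N//2)]
--     for i in range(0,N,2): # 2*2로 슬라이싱
--         for j in range(0,N,2):
--             insert = sorted([mat[i][j],mat[i][j+1],mat[i+1][j],mat[i+1][j+1]])
--             sub_mat[i//2].append(insert[2])# 두번째로 큰 값만 추가
--     return two_pooling(sub_mat, N//2)
-- ===== SOURCE B (Python) =====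
-- def _second_largest(a, b, c, d):
--     # streaming top-2: keep (hi, lo), feed c then d
--     hi, lo = (a, b) if a >= b else (b, a)
--     if c > hi:
--         hi, lo = c, hi
--     elif c > lo:
--         lo = c
--     if d > hi:
--         hi, lo = d, hi
--     elif d > lo:
--         lo = d
--     return lo
--
--
-- def two_pooling(mat, N):
--     while N != 1:
--         mat = [[_second_largest(mat[r][c], mat[r][c + 1], mat[r + 1][c], mat[r + 1][c + 1])
--                 for c in range(0, N, 2)]
--                for r in range(0, N, 2)]
--         N //= 2
--     return mat[0][0]
-- ===== Notes on version B (the rewrite author's own statement) =====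
-- stated objective: alternative
-- what changed: Replaces the recursion and the append-into-prebuilt-empty-rows loops (sub_mat[i//2].append of sorted(...)[2]) with an iterative while-loop whose body is a nested comprehension building each row directly, computing each block's second-largest by a streaming top-2 comparison chain instead of sorting the four values.
import Mathlib
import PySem

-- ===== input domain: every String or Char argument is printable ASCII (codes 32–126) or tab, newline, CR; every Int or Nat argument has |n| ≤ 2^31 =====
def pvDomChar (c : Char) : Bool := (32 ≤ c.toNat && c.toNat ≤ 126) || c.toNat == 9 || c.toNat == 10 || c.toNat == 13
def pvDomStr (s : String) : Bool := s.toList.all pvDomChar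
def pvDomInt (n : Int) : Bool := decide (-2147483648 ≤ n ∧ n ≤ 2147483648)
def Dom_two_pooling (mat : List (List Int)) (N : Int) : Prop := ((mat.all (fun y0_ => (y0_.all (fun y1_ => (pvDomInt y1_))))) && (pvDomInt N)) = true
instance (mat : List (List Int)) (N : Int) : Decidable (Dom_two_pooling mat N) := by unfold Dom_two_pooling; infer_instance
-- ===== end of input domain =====

-- B replaces A's recursion and index-range loops (append into pre-built empty rows) by an
-- iterative while-loop pairing rows two-at-a-time, with a streaming top-2 scan instead of sorting each block.

-- ===== PORT A =====
-- mat[i][j]; on every call reached under Pre_ both indices are in range, so pyGetD's default never fires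
def pvAtA (mat : List (List Int)) (i j : Int) : Int :=
  PySem.List.pyGetD (PySem.List.pyGetD mat i []) j 0

-- sorted([a,b,c,d])[2]; the sorted list has length 4, so index 2 is always in range
def pvSortedSecond (a b c d : Int) : Int :=
  PySem.List.pyGetD (PySem.List.sorted [a, b, c, d] (fun x => x) false) 2 0

-- one level of A: sub_mat = N//2 empty rows, then append into sub_mat[i//2] for each (i, j) block
-- (List.modify models sub_mat[i//2].append; i//2 is in range on every call reached under Pre_)
def pvSubA (mat : List (List Int)) (N : Int) : List (List Int) :=
  (PySem.List.pyRange 0 N 2).foldl (fun sm i =>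
    (PySem.List.pyRange 0 N 2).foldl (fun sm j =>
      sm.modify (PySem.Int.floordiv i 2).toNat
        (fun row => row ++ [pvSortedSecond (pvAtA mat i j) (pvAtA mat i (j+1))
                              (pvAtA mat (i+1) j) (pvAtA mat (i+1) (j+1))])) sm)
    ((PySem.List.pyRange 0 (PySem.Int.floordiv N 2) 1).map (fun _ => ([] : List Int)))

-- fuel only makes the recursion total; N.toNat + 1 halving steps always suffice under Pre_
def two_pooling_go (fuel : Nat) (mat : List (List Int)) (N : Int) : Int :=
  match fuel with
  | 0 => 0
  | fuel + 1 =>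
    if N = 1 then pvAtA mat 0 0
    else two_pooling_go fuel (pvSubA mat N) (PySem.Int.floordiv N 2)

def two_pooling (mat : List (List Int)) (N : Int) : Int :=
  two_pooling_go (N.toNat + 1) mat N

-- ===== PORT B =====
-- mat[r][c]; on every call reached under Pre_ both indices are in range, so pyGetD's default never fires
def pvAtB (mat : List (List Int)) (i j : Int) : Int :=
  PySem.List.pyGetD (PySem.List.pyGetD mat i []) j 0

-- streaming top-2 of the four block values: seed (hi, lo) from (a, b), then feed c and d
def pvSecond2 (a b c d : Int) : Int :=
  let hl := if a ≥ b then (a, b) else (b, a)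
  let hl := if c > hl.1 then (c, hl.1) else if c > hl.2 then (hl.1, c) else hl
  let hl := if d > hl.1 then (d, hl.1) else if d > hl.2 then (hl.1, d) else hl
  hl.2

-- the nested comprehension of one while-iteration of B
def pvStepB (mat : List (List Int)) (N : Int) : List (List Int) :=
  (PySem.List.pyRange 0 N 2).map (fun r => (PySem.List.pyRange 0 N 2).map (fun c =>
    pvSecond2 (pvAtB mat r c) (pvAtB mat r (c+1)) (pvAtB mat (r+1) c) (pvAtB mat (r+1) (c+1))))

-- the while-loop, made total with fuel; N.toNat + 1 halving steps always suffice under Pre_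
def two_pooling_alt_go (fuel : Nat) (mat : List (List Int)) (N : Int) : List (List Int) × Int :=
  match fuel with
  | 0 => (mat, N)
  | fuel + 1 =>
    if N ≠ 1 then two_pooling_alt_go fuel (pvStepB mat N) (PySem.Int.floordiv N 2) else (mat, N)

-- final mat[0][0]; mat is nonempty under Pre_, so pyGetD's default never fires
def two_pooling_alt (mat : List (List Int)) (N : Int) : Int :=
  PySem.List.pyGetD (PySem.List.pyGetD (two_pooling_alt_go (N.toNat + 1) mat N).1 0 []) 0 0

-- ===== PRECONDITION & SPEC =====
-- Exactly the inputs on which A returns (everywhere else it raises): N must be a power of two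
-- (otherwise the recursion reaches an odd level size > 1, or never reaches 1, and raises
-- IndexError/RecursionError) and the top-left N×N block must be fully present in mat.
-- ('N = 2 ^ N.toNat.log2' is the closed-form, directly computable statement that N is a power of two.)
def Pre_two_pooling (mat : List (List Int)) (N : Int) : Prop :=
  N = 2 ^ Nat.log2 N.toNat ∧ N.toNat ≤ mat.length ∧
    ∀ row ∈ mat.take N.toNat, N.toNat ≤ row.length
instance (mat : List (List Int)) (N : Int) : Decidable (Pre_two_pooling mat N) := by
  unfold Pre_two_pooling; infer_instance

def pvWitness_two_pooling : List (List Int) × Int := ([[1, 2], [3, 4]], 2)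

def Spec_two_pooling (mat : List (List Int)) (N : Int) (out : Int) : Prop := out = two_pooling_alt mat N
instance (mat : List (List Int)) (N : Int) (out : Int) : Decidable (Spec_two_pooling mat N out) := by unfold Spec_two_pooling; infer_instance

-- ===== CLAIM (what is proved, stated in full; the proofs are below) =====
def Claim_equal_two_pooling : Prop := ∀ (mat : List (List Int)) (N : Int), Dom_two_pooling mat N → Pre_two_pooling mat N → Spec_two_pooling mat N (two_pooling mat N)

-- ===== LEMMAS AND PROOFS =====

-- the (i, j) entry of mat, Nat-indexed, defaulting like the ports' pyGetD
def pvE (mat : List (List Int)) (i j : Nat) : Int := (mat.getD i []).getD j 0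

-- row u of the canonical value of one pooling level on the top-left 2m × 2m region
def pvRow (mat : List (List Int)) (m u : Nat) : List Int :=
  (List.range m).map (fun v =>
    pvSecond2 (pvE mat (2*u) (2*v)) (pvE mat (2*u) (2*v+1))
              (pvE mat (2*u+1) (2*v)) (pvE mat (2*u+1) (2*v+1)))

-- the canonical value of one pooling level on the top-left 2m × 2m region
def pvP (mat : List (List Int)) (m : Nat) : List (List Int) :=
  (List.range m).map (pvRow mat m)

-- A's sorted([a,b,c,d])[2] is B's streaming top-2
set_option maxHeartbeats 4000000 in
lemma pvSortedSecond_eq (a b c d : Int) : pvSortedSecond a b c d = pvSecond2 a b c d := by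
  simp only [pvSortedSecond, pvSecond2, PySem.List.sorted, List.foldl, PySem.List.insertBy]
  split_ifs <;> (try simp only [PySem.List.insertBy]) <;>
  (try split_ifs) <;> (try simp only [PySem.List.insertBy]) <;>
  (try split_ifs) <;>
    simp_all [PySem.List.pyGetD, PySem.List.pyGet?, PySem.List.pyIdx?] <;> omega

lemma pvModify_modify (l : List (List Int)) :
    ∀ (i : Nat) (f g : List Int → List Int),
      (l.modify i f).modify i g = l.modify i (fun x => g (f x)) := by
  induction l with
  | nil => simp
  | cons h t ih =>
    intro i f g
    cases i with
    | zero => simp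
    | succ i => simp [List.modify_succ_cons, ih]

lemma pvModify_id (l : List (List Int)) (t : Nat) : l.modify t (fun x => x) = l := by
  induction l generalizing t with
  | nil => simp
  | cons h l ih => cases t <;> simp [List.modify_succ_cons, ih]

lemma pvModify_append (l1 l2 : List (List Int)) (x : List Int) (f : List Int → List Int) :
    (l1 ++ x :: l2).modify l1.length f = l1 ++ f x :: l2 := by
  induction l1 with
  | nil => simp
  | cons h t ih => simp [List.modify_succ_cons, ih]

lemma pvFoldl_modify_append {α : Type} (js : List α) (t : Nat) (f : α → Int) :
    ∀ s : List (List Int),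
      js.foldl (fun s j => s.modify t (fun row => row ++ [f j])) s
        = s.modify t (fun row => row ++ js.map f) := by
  induction js with
  | nil => intro s; simp [pvModify_id]
  | cons j js ih =>
    intro s
    simp only [List.foldl, List.map, ih, pvModify_modify, List.append_assoc, List.cons_append,
      List.nil_append]

lemma pvBuild (row : Nat → List Int) :
    ∀ (rem t : Nat) (done : List (List Int)), done.length = t →
      (List.range' t rem).foldl (fun s u => s.modify u (fun r => r ++ row u))
          (done ++ List.replicate rem []) = done ++ (List.range' t rem).map row := by
  intro rem
  induction rem with
  | zero => intro t done _; simp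
  | succ rem ih =>
    intro t done hlen
    subst hlen
    rw [List.range'_succ, List.replicate_succ]
    simp only [List.foldl, List.map]
    rw [pvModify_append, List.nil_append]
    have := ih (done.length + 1) (done ++ [row done.length]) (by simp)
    simpa [List.append_assoc] using this

lemma pvAtA_toNat (mat : List (List Int)) (i j : Int) (hi : 0 ≤ i) (hj : 0 ≤ j) :
    pvAtA mat i j = pvE mat i.toNat j.toNat := by
  simp [pvAtA, pvE, PySem.List.pyGetD_of_nonneg _ _ hi, PySem.List.pyGetD_of_nonneg _ _ hj]

lemma pvSubA_eq (mat : List (List Int)) (m : Nat) (hm : 0 < m) :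
    pvSubA mat (2 * (m : Int)) = pvP mat m := by
  have h2 : (0:Int) < 2 := by norm_num
  have hN : (0:Int) < 2 * (m:Int) := by positivity
  have hfd : PySem.Int.floordiv (2 * (m:Int)) 2 = (m:Int) := by
    rw [PySem.Int.floordiv_eq_ediv_of_pos h2, Int.mul_ediv_cancel_left _ (by norm_num)]
  have hcnt : ((2 * (m:Int) - 0 + 2 - 1) / 2).toNat = m := by omega
  have hrange : PySem.List.pyRange 0 (2 * (m:Int)) 2
      = (List.range m).map (fun k : Nat => (0:Int) + 2 * (k:Int)) := by
    rw [PySem.List.pyRange_of_pos _ _ h2, if_pos hN, hcnt]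
  have hinit : (PySem.List.pyRange 0 (PySem.Int.floordiv (2 * (m:Int)) 2) 1).map
      (fun _ => ([] : List Int)) = List.replicate m [] := by
    rw [hfd, PySem.List.pyRange_one]
    simp [Function.comp_def]
  unfold pvSubA
  rw [hrange, hinit, List.foldl_map]
  refine Eq.trans (PySem.List.foldl_congr_mem _ _
    (fun s (k : Nat) => s.modify k (fun r => r ++ pvRow mat m k)) _ ?_) ?_
  · intro s k _
    have hkfd : (PySem.Int.floordiv ((0:Int) + 2 * (k:Int)) 2).toNat = k := by
      rw [zero_add, PySem.Int.floordiv_eq_ediv_of_pos h2,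
        Int.mul_ediv_cancel_left _ (by norm_num)]
      omega
    rw [List.foldl_map, hkfd, pvFoldl_modify_append]
    congr 1
    funext r
    congr 1
    apply List.map_congr_left
    intro v _
    rw [pvSortedSecond_eq,
      pvAtA_toNat mat _ _ (by positivity) (by positivity),
      pvAtA_toNat mat _ _ (by positivity) (by positivity),
      pvAtA_toNat mat _ _ (by positivity) (by positivity),
      pvAtA_toNat mat _ _ (by positivity) (by positivity)]
    simp only [show ((0:Int)+2*(k:Int)).toNat = 2*k from by omega,
      show ((0:Int)+2*(k:Int)+1).toNat = 2*k+1 from by omega,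
      show ((0:Int)+2*(v:Int)).toNat = 2*v from by omega,
      show ((0:Int)+2*(v:Int)+1).toNat = 2*v+1 from by omega]
  · rw [List.range_eq_range']
    have := pvBuild (pvRow mat m) m 0 [] rfl
    simp only [List.nil_append] at this
    rw [this, pvP, List.range_eq_range']

lemma pvAtB_toNat (mat : List (List Int)) (i j : Int) (hi : 0 ≤ i) (hj : 0 ≤ j) :
    pvAtB mat i j = pvE mat i.toNat j.toNat := by
  simp [pvAtB, pvE, PySem.List.pyGetD_of_nonneg _ _ hi, PySem.List.pyGetD_of_nonneg _ _ hj]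

lemma pvStepB_eq (mat : List (List Int)) (m : Nat) (hm : 0 < m) :
    pvStepB mat (2 * (m : Int)) = pvP mat m := by
  have h2 : (0:Int) < 2 := by norm_num
  have hN : (0:Int) < 2 * (m:Int) := by positivity
  have hcnt : ((2 * (m:Int) - 0 + 2 - 1) / 2).toNat = m := by omega
  have hrange : PySem.List.pyRange 0 (2 * (m:Int)) 2
      = (List.range m).map (fun k : Nat => (0:Int) + 2 * (k:Int)) := by
    rw [PySem.List.pyRange_of_pos _ _ h2, if_pos hN, hcnt]
  unfold pvStepB pvP
  rw [hrange, List.map_map]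
  apply List.map_congr_left
  intro u _
  simp only [Function.comp_def]
  rw [List.map_map]
  unfold pvRow
  apply List.map_congr_left
  intro v _
  simp only [Function.comp_def]
  rw [pvAtB_toNat mat _ _ (by positivity) (by positivity),
    pvAtB_toNat mat _ _ (by positivity) (by positivity),
    pvAtB_toNat mat _ _ (by positivity) (by positivity),
    pvAtB_toNat mat _ _ (by positivity) (by positivity)]
  simp only [show ((0:Int)+2*(u:Int)).toNat = 2*u from by omega,
    show ((0:Int)+2*(u:Int)+1).toNat = 2*u+1 from by omega,
    show ((0:Int)+2*(v:Int)).toNat = 2*v from by omega,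
    show ((0:Int)+2*(v:Int)+1).toNat = 2*v+1 from by omega]

lemma pvMain : ∀ (k fuel : Nat) (mat : List (List Int)) (N : Int), N = 2 ^ k → k < fuel →
    two_pooling_go fuel mat N
      = PySem.List.pyGetD (PySem.List.pyGetD (two_pooling_alt_go fuel mat N).1 0 []) 0 0 := by
  intro k
  induction k with
  | zero =>
    intro fuel mat N hN hf
    subst hN
    cases fuel with
    | zero => omega
    | succ f => simp [two_pooling_go, two_pooling_alt_go, pvAtA]
  | succ k ih =>
    intro fuel mat N hN hf
    cases fuel with
    | zero => omega
    | succ f =>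
      have hmpos : 0 < 2 ^ k := Nat.pow_pos (by norm_num)
      have hcast : ((2 ^ k : Nat) : Int) = (2:Int) ^ k := by push_cast; rfl
      have hNval : N = 2 * ((2 ^ k : Nat) : Int) := by
        rw [hN, hcast, pow_succ]; ring
      have hcpos : (0:Int) < ((2 ^ k : Nat) : Int) := by exact_mod_cast hmpos
      have hN1 : N ≠ 1 := by omega
      have hfd : PySem.Int.floordiv N 2 = ((2 ^ k : Nat) : Int) := by
        rw [hNval, PySem.Int.floordiv_eq_ediv_of_pos (by norm_num),
          Int.mul_ediv_cancel_left _ (by norm_num)]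
      rw [two_pooling_go, two_pooling_alt_go, if_neg hN1, if_pos hN1]
      rw [hNval, pvSubA_eq mat (2^k) hmpos, pvStepB_eq mat (2^k) hmpos, ← hNval, hfd]
      exact ih f (pvP mat (2^k)) _ hcast.symm (by omega)

-- ===== VERDICT (by name: the statement is the Claim_ definition above) =====
theorem two_pooling_spec : Claim_equal_two_pooling := by
  intro mat N _ hpre
  obtain ⟨hN, _, _⟩ := hpre
  set k := Nat.log2 N.toNat with hk
  unfold Spec_two_pooling two_pooling two_pooling_alt
  apply pvMain k _ mat N hN
  have hcast : ((2 ^ k : Nat) : Int) = (2:Int) ^ k := by push_cast; rfl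
  have : N.toNat = 2 ^ k := by
    have : (0:Int) < ((2 ^ k : Nat) : Int) := by exact_mod_cast Nat.pow_pos (by norm_num : 0 < 2)
    omega
  rw [this]
  exact Nat.lt_succ_of_lt Nat.lt_two_pow_self
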